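-- pv_equiv track=rewrite | github.com/foones/dharma | hz/gui/main.py | rotate_players
-- ===== SOURCE A (Python) =====
-- def rotate_players(players, player):
--     """Rotate the list of players for 'player' to be the first
--        element in the list."""
--     prev = []
--     post = []
--     self_seen = False
--     for p in players:
--         if p == player:
--             self_seen = True
--         if self_seen:
--             prev.append(p)
--         else:
--             post.append(p)
--     return prev + post
-- ===== SOURCE B (Python) =====
-- def rotate_players(players, player):
--     """Rotate the list of players for 'player' to be the first
--        element in the list."""
--     try:
--         i = players.index(player)
--     except ValueError:
--         return list(players)
--     return players[i:] + players[:i]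
-- ===== Notes on version B (the rewrite author's own statement) =====
-- stated objective: simpler
-- what changed: Replaces the single running scan that grows two accumulator lists element by element with a pivot-then-slice decomposition: find the first index of player (or return a copy if absent) and concatenate the two slices.
import Mathlib
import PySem

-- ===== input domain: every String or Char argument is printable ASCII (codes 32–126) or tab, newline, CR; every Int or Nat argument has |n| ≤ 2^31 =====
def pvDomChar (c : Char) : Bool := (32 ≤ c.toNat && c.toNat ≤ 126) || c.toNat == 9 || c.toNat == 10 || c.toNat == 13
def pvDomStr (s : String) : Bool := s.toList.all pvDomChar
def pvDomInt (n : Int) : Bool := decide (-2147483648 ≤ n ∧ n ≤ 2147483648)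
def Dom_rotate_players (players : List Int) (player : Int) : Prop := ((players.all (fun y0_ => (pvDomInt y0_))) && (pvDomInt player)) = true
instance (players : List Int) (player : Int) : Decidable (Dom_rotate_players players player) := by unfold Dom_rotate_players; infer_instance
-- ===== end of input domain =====

-- B replaces A's single running two-accumulator scan with a pivot-then-slice decomposition (simpler); return-value equivalence only.


-- ===== PORT A =====
-- one loop step of A: update self_seen, then append p to prev or post
def rpStep (player : Int) (s : List Int × List Int × Bool) (p : Int) : List Int × List Int × Bool :=
  let seen := if p == player then true else s.2.2
  if seen then (s.1 ++ [p], s.2.1, seen) else (s.1, s.2.1 ++ [p], seen)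

def rotate_players (players : List Int) (player : Int) : List Int :=
  let st := players.foldl (rpStep player) ([], [], false)
  st.1 ++ st.2.1

-- ===== PORT B =====
def rotate_players_alt (players : List Int) (player : Int) : List Int :=
  match PySem.List.index? players player with
  | none => players
  | some i => PySem.List.slice players (some (i : Int)) none ++
              PySem.List.slice players none (some (i : Int))

-- ===== PRECONDITION & SPEC =====
def Spec_rotate_players (players : List Int) (player : Int) (out : List Int) : Prop := out = rotate_players_alt players player
instance (players : List Int) (player : Int) (out : List Int) : Decidable (Spec_rotate_players players player out) := by unfold Spec_rotate_players; infer_instance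

-- ===== CLAIM (what is proved, stated in full; the proofs are below) =====
def Claim_equal_rotate_players : Prop := ∀ (players : List Int) (player : Int), Dom_rotate_players players player → Spec_rotate_players players player (rotate_players players player)

-- ===== LEMMAS AND PROOFS =====

-- once self_seen is true, every element goes to prev
theorem rpFold_seen (player : Int) (l prev post : List Int) :
    l.foldl (rpStep player) (prev, post, true) = (prev ++ l, post, true) := by
  induction l generalizing prev with
  | nil => simp
  | cons x xs ih => simp [rpStep, ih]

-- while player has not appeared, every element goes to post
theorem rpFold_unseen (player : Int) (l prev post : List Int) (h : player ∉ l) :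
    l.foldl (rpStep player) (prev, post, false) = (prev, post ++ l, false) := by
  induction l generalizing post with
  | nil => simp
  | cons x xs ih =>
      have hx : x ≠ player := fun hxp => h (hxp ▸ List.mem_cons_self)
      have hxs : player ∉ xs := fun hm => h (List.mem_cons_of_mem _ hm)
      simp [rpStep, hx, ih _ hxs]

theorem rotate_players_spec' (players : List Int) (player : Int) :
    rotate_players players player = rotate_players_alt players player := by
  unfold rotate_players rotate_players_alt
  cases hidx : PySem.List.index? players player with
  | none =>
      have hmem : player ∉ players := (PySem.List.index?_eq_none_iff _ _).1 hidx
      simp [rpFold_unseen player players [] [] hmem]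
  | some i =>
      obtain ⟨pre, suf, hsplit, hlen, hpre⟩ := (PySem.List.index?_eq_some_iff _ _ _).1 hidx
      subst hsplit
      rw [List.foldl_append, rpFold_unseen player pre [] [] hpre]
      simp only [List.nil_append]
      have hstep : rpStep player ([], pre, false) player = ([player], pre, true) := by
        simp [rpStep]
      rw [List.foldl_cons, hstep, rpFold_seen,
        PySem.List.slice_from_natCast, PySem.List.slice_to_natCast]
      simp [← hlen]

-- ===== VERDICT (by name: the statement is the Claim_ definition above) =====
theorem rotate_players_spec : Claim_equal_rotate_players := by
  intro players player _
  exact rotate_players_spec' players player
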